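-- pv_equiv track=rewrite | github.com/zhujv/-evolver | evolver/providers/router.py | _pick_provider_by_priority
-- ===== SOURCE A (Python) =====
-- from typing import List, Dict, Optional
--
-- def _pick_provider_by_priority(provider_configs: Dict[str, Dict]) -> Optional[str]:
--     """未显式指定 preferred_provider 时，按固定优先级选择，避免 JSON 键序让旧的 custom 中转长期优先于官方线路。"""
--     priority = ("zhipu", "deepseek", "openai", "anthropic", "google", "custom")
--     for name in priority:
--         cfg = provider_configs.get(name)
--         if isinstance(cfg, dict) and cfg.get("endpoint"):
--             return name
--     for name, cfg in provider_configs.items():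
--         if isinstance(cfg, dict) and cfg.get("endpoint"):
--             return name
--     return None
-- ===== SOURCE B (Python) =====
-- from typing import List, Dict, Optional
--
-- def _pick_provider_by_priority(provider_configs: Dict[str, Dict]) -> Optional[str]:
--     """Single pass: collect valid candidates, then pick the one with the minimal
--     priority rank (names outside the priority tuple rank last); Python's min is
--     stable, so ties keep dict insertion order."""
--     priority = ("zhipu", "deepseek", "openai", "anthropic", "google", "custom")
--     candidates = [(name, cfg) for name, cfg in provider_configs.items()
--                   if isinstance(cfg, dict) and cfg.get("endpoint")]
--     if not candidates:
--         return None
--     return min(candidates,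
--                key=lambda nc: priority.index(nc[0]) if nc[0] in priority else len(priority))[0]
-- ===== Notes on version B (the rewrite author's own statement) =====
-- stated objective: alternative
-- what changed: Replaced A's two sequential early-return scans (probe each priority name via dict lookup, then a dict-order fallback scan) by one filter of the valid entries followed by a single stable min-by-priority-rank selection; Pre_ excludes association lists with duplicate keys, which do not represent any Python dict, so which entry a repeated key denotes is unspecified there.
import Mathlib
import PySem

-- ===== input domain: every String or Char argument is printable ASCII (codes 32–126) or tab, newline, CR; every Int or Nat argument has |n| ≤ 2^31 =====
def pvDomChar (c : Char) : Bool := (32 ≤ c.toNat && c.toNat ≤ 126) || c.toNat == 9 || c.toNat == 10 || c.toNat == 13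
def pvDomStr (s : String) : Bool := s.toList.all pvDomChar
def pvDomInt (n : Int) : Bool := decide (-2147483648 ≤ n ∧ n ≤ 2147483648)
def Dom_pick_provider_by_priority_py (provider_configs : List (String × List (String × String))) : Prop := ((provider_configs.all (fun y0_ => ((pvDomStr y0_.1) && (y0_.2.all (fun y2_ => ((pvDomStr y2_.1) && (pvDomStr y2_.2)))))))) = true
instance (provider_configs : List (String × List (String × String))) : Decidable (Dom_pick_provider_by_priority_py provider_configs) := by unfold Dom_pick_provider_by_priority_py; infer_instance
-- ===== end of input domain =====

-- B replaces A's two sequential early-return scans by filter + stable min-by-priority-rank (alternative decomposition, same cost).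


-- ===== PORT A =====
-- truthiness of cfg.get("endpoint"): present and a nonempty string (values are str on this domain)
def pvEndpointTruthy (cfg : List (String × String)) : Bool :=
  match (PySem.Dict.mk cfg).get? "endpoint" with
  | some s => !(s == "")
  | none => false

-- first for-loop of A: for name in priority: cfg = provider_configs.get(name); if … : return name
def pvPickLoop1 (provider_configs : List (String × List (String × String))) : List String → Option String
  | [] => none
  | name :: rest =>
    match (PySem.Dict.mk provider_configs).get? name with
    | some cfg => if pvEndpointTruthy cfg then some name else pvPickLoop1 provider_configs rest
    | none => pvPickLoop1 provider_configs rest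

-- second for-loop of A: for name, cfg in provider_configs.items(): if … : return name
def pvPickLoop2 : List (String × List (String × String)) → Option String
  | [] => none
  | (name, cfg) :: rest => if pvEndpointTruthy cfg then some name else pvPickLoop2 rest

def pick_provider_by_priority_py (provider_configs : List (String × List (String × String))) : Option String :=
  match pvPickLoop1 provider_configs ["zhipu", "deepseek", "openai", "anthropic", "google", "custom"] with
  | some name => some name
  | none => pvPickLoop2 provider_configs

-- ===== PORT B =====
-- key of B's min: priority.index(name) if name in priority else len(priority)
def pvPriorityKey (priority : List String) (name : String) : Nat :=
  match PySem.List.index? priority name with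
  | some i => i
  | none => priority.length

def pick_provider_by_priority_py_alt (provider_configs : List (String × List (String × String))) : Option String :=
  let priority : List String := ["zhipu", "deepseek", "openai", "anthropic", "google", "custom"]
  let candidates := provider_configs.filter (fun nc => pvEndpointTruthy nc.2)
  match PySem.List.min? candidates (fun nc => pvPriorityKey priority nc.1) with
  | none => none
  | some nc => some nc.1

-- ===== PRECONDITION & SPEC =====
-- Pre_ excludes association lists with duplicate keys: those do not represent any Python dict
-- (a dict cannot carry two entries for one key), so which entry a repeated key denotes is unspecified
-- and A's first-match lookup and B's stable min may disagree there.
def Pre_pick_provider_by_priority_py (provider_configs : List (String × List (String × String))) : Prop :=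
  (provider_configs.map Prod.fst).Nodup
instance (provider_configs : List (String × List (String × String))) : Decidable (Pre_pick_provider_by_priority_py provider_configs) := by unfold Pre_pick_provider_by_priority_py; infer_instance

def pvWitness_pick_provider_by_priority_py : (List (String × List (String × String))) :=
  [("custom", [("endpoint", "http://x")]), ("openai", [("endpoint", "y")]), ("foo", [])]

def Spec_pick_provider_by_priority_py (provider_configs : List (String × List (String × String))) (out : Option String) : Prop := out = pick_provider_by_priority_py_alt provider_configs
instance (provider_configs : List (String × List (String × String))) (out : Option String) : Decidable (Spec_pick_provider_by_priority_py provider_configs out) := by unfold Spec_pick_provider_by_priority_py; infer_instance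

-- ===== CLAIM (what is proved, stated in full; the proofs are below) =====
def Claim_equal_pick_provider_by_priority_py : Prop := ∀ (provider_configs : List (String × List (String × String))), Dom_pick_provider_by_priority_py provider_configs → Pre_pick_provider_by_priority_py provider_configs → Spec_pick_provider_by_priority_py provider_configs (pick_provider_by_priority_py provider_configs)

-- ===== LEMMAS AND PROOFS =====

-- the stable-min fold ignores the keys' common shift by +1
theorem pvMinFold_shift {α : Type} (k k' : α → Nat) :
    ∀ (cs : List α) (acc : Option α),
      (∀ c ∈ cs, k' c = k c + 1) → (∀ m, acc = some m → k' m = k m + 1) →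
      cs.foldl (fun acc x => match acc with | none => some x | some m => if k' x < k' m then some x else some m) acc
        = cs.foldl (fun acc x => match acc with | none => some x | some m => if k x < k m then some x else some m) acc := by
  intro cs
  induction cs with
  | nil => intro acc _ _; rfl
  | cons c cs ih =>
    intro acc hcs hacc
    have hc : k' c = k c + 1 := hcs c (by simp)
    have hcs' : ∀ x ∈ cs, k' x = k x + 1 := fun x hx => hcs x (by simp [hx])
    cases acc with
    | none => simpa using ih (some c) hcs' (by intro m hm; cases hm; exact hc)
    | some m =>
      have hm : k' m = k m + 1 := hacc m rfl
      simp only [List.foldl_cons]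
      by_cases hlt : k c < k m
      · rw [if_pos (show k' c < k' m by omega), if_pos hlt]
        exact ih (some c) hcs' (by intro x hx; cases hx; exact hc)
      · rw [if_neg (show ¬ k' c < k' m by omega), if_neg hlt]
        exact ih (some m) hcs' (by intro x hx; cases hx; exact hm)

theorem pvMin?_shift {α : Type} (k k' : α → Nat) (cs : List α)
    (h : ∀ c ∈ cs, k' c = k c + 1) :
    PySem.List.min? cs k' = PySem.List.min? cs k := by
  simpa [PySem.List.min?] using pvMinFold_shift k k' cs none h (by intro m hm; cases hm)

-- with a constant key the stable-min fold keeps its accumulator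
theorem pvMinFold_const {α : Type} (k : α → Nat) (v : Nat) :
    ∀ (cs : List α) (m : α), (∀ c ∈ cs, k c = v) → k m = v →
      cs.foldl (fun acc x => match acc with | none => some x | some m => if k x < k m then some x else some m) (some m)
        = some m := by
  intro cs
  induction cs with
  | nil => intro m _ _; rfl
  | cons c cs ih =>
    intro m hcs hm
    have hc : k c = v := hcs c (by simp)
    simp only [List.foldl_cons]
    rw [if_neg (by omega)]
    exact ih m (fun x hx => hcs x (by simp [hx])) hm

theorem pvMin?_const {α : Type} (k : α → Nat) (v : Nat) (cs : List α)
    (h : ∀ c ∈ cs, k c = v) :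
    PySem.List.min? cs k = cs.head? := by
  cases cs with
  | nil => rfl
  | cons c cs =>
    simp only [PySem.List.min?, List.foldl_cons, List.head?_cons]
    exact pvMinFold_const k v cs c (fun x hx => h x (by simp [hx])) (h c (by simp))

-- A's fallback scan is head-of-filter
theorem pvLoop2_eq_filter_head (L : List (String × List (String × String))) :
    pvPickLoop2 L = ((L.filter (fun nc => pvEndpointTruthy nc.2)).head?).map Prod.fst := by
  induction L with
  | nil => rfl
  | cons c L ih =>
    obtain ⟨n, cfg⟩ := c
    by_cases h : pvEndpointTruthy cfg
    · simp [pvPickLoop2, h]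
    · simp [pvPickLoop2, h, ih]

theorem pvKey_nil (n : String) : pvPriorityKey [] n = 0 := by
  simp [pvPriorityKey, PySem.List.index?]

theorem pvKey_zero {p : String} {P : List String} {n : String}
    (h : pvPriorityKey (p :: P) n = 0) : n = p := by
  unfold pvPriorityKey at h
  cases hidx : PySem.List.index? (p :: P) n with
  | none => rw [hidx] at h; simp at h
  | some i =>
    rw [hidx] at h; simp at h
    subst h
    obtain ⟨hk, hx, -⟩ := PySem.List.getElem_of_index?_eq_some hidx
    simpa using hx.symm

theorem pvKey_cons_of_ne {p n : String} (P : List String) (h : n ≠ p) :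
    pvPriorityKey (p :: P) n = pvPriorityKey P n + 1 := by
  unfold pvPriorityKey
  have hh := PySem.List.index?_cons_of_ne (x := p) (v := n) P (fun hh => h hh.symm)
  rw [hh]
  cases PySem.List.index? P n <;> simp

theorem pvAlt_eq (pcs : List (String × List (String × String))) :
    pick_provider_by_priority_py_alt pcs
      = (PySem.List.min? (pcs.filter (fun nc => pvEndpointTruthy nc.2))
          (fun nc => pvPriorityKey ["zhipu", "deepseek", "openai", "anthropic", "google", "custom"] nc.1)).map Prod.fst := by
  unfold pick_provider_by_priority_py_alt
  cases h : PySem.List.min? (pcs.filter (fun nc => pvEndpointTruthy nc.2))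
      (fun nc => pvPriorityKey ["zhipu", "deepseek", "openai", "anthropic", "google", "custom"] nc.1) <;>
    simp [h]

-- the central bridge: A's double scan vs B's stable min, for any priority list
theorem pvPick_main (L : List (String × List (String × String)))
    (hnd : (L.map Prod.fst).Nodup) : ∀ (P : List String),
    (match pvPickLoop1 L P with
      | some name => some name
      | none => pvPickLoop2 L)
      = (PySem.List.min? (L.filter (fun nc => pvEndpointTruthy nc.2))
          (fun nc => pvPriorityKey P nc.1)).map Prod.fst := by
  have hkeys : (PySem.Dict.mk L).keys.Nodup := by
    simpa [PySem.Dict.keys, PySem.Dict.items] using hnd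
  intro P
  induction P with
  | nil =>
    rw [pvMin?_const (fun (nc : String × List (String × String)) => pvPriorityKey [] nc.1) 0
      (L.filter (fun nc => pvEndpointTruthy nc.2)) (fun c _ => pvKey_nil c.1)]
    simpa [pvPickLoop1] using pvLoop2_eq_filter_head L
  | cons p P ih =>
    by_cases h : ∃ cfg, (PySem.Dict.mk L).get? p = some cfg ∧ pvEndpointTruthy cfg
    · obtain ⟨cfg, hget, hval⟩ := h
      have hmemL : (p, cfg) ∈ L := PySem.Dict.mem_items_of_get?_eq_some _ hget
      have hmemC : (p, cfg) ∈ L.filter (fun nc => pvEndpointTruthy nc.2) :=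
        List.mem_filter.mpr ⟨hmemL, hval⟩
      have hkey0 : pvPriorityKey (p :: P) p = 0 := by
        unfold pvPriorityKey
        have := PySem.List.index?_cons_self (x := p) (xs := P)
        rw [this]
      -- LHS returns p
      have hlhs : pvPickLoop1 L (p :: P) = some p := by
        simp only [pvPickLoop1]; rw [hget]; simp [hval]
      rw [hlhs]
      -- RHS: min? is some m with key 0, hence m.1 = p
      cases hmin : PySem.List.min? (L.filter (fun nc => pvEndpointTruthy nc.2))
          (fun nc => pvPriorityKey (p :: P) nc.1) with
      | none =>
        exact absurd ((PySem.List.min?_eq_none_iff _ _).mp hmin ▸ hmemC) (by simp)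
      | some m =>
        have hle := PySem.List.min?_isMin hmin _ hmemC
        rw [hkey0] at hle
        have hz : pvPriorityKey (p :: P) m.1 = 0 := Nat.le_zero.mp hle
        simp [pvKey_zero hz]
    · -- p has no valid entry: loop1 skips it and every candidate's key shifts by one
      have hnot : ∀ c ∈ L.filter (fun nc => pvEndpointTruthy nc.2), c.1 ≠ p := by
        intro c hc hcp
        have hmem := List.mem_filter.mp hc
        have hg : (PySem.Dict.mk L).get? c.1 = some c.2 :=
          PySem.Dict.get?_of_mem_items _ hmem.1 hkeys
        exact h ⟨c.2, hcp ▸ hg, by simpa using hmem.2⟩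
      have hshift : ∀ c ∈ L.filter (fun nc => pvEndpointTruthy nc.2),
          pvPriorityKey (p :: P) c.1 = pvPriorityKey P c.1 + 1 :=
        fun c hc => pvKey_cons_of_ne P (hnot c hc)
      have hlhs : pvPickLoop1 L (p :: P) = pvPickLoop1 L P := by
        simp only [pvPickLoop1]
        cases hget : (PySem.Dict.mk L).get? p with
        | none => rfl
        | some cfg =>
          have hv : pvEndpointTruthy cfg = false := by
            by_contra hh
            exact h ⟨cfg, hget, by simpa using hh⟩
          simp [hv]
      rw [hlhs, pvMin?_shift (fun nc => pvPriorityKey P nc.1) _ _ hshift]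
      exact ih

-- ===== VERDICT (by name: the statement is the Claim_ definition above) =====
theorem pick_provider_by_priority_py_spec : Claim_equal_pick_provider_by_priority_py := by
  intro pcs _ hpre
  unfold Spec_pick_provider_by_priority_py
  rw [pvAlt_eq]
  exact pvPick_main pcs hpre ["zhipu", "deepseek", "openai", "anthropic", "google", "custom"]
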